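-- pv_equiv track=rewrite | github.com/lihengcao/coding-challenges | Advent of Code/2023/11/main.py | get_expanded_image
-- ===== SOURCE A (Python) =====
-- def get_expanded_image(lines: list[str]) -> list[list[str]]:
--     m, n = len(lines), len(lines[0])
--     rows_to_expand_reversed = [
--         i for i in range(m - 1, -1, -1) if lines[i].find("#") == -1
--     ]
--     cols_to_expand = [i for i in range(n) if all(lines[j][i] != "#" for j in range(m))]
--
--     out = []
--     for row in range(m):
--         if rows_to_expand_reversed and rows_to_expand_reversed[-1] == row:
--             out.append(["."] * (n + len(cols_to_expand)))
--             rows_to_expand_reversed.pop()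
--
--         expand_i = 0
--         out.append([])
--         for col in range(n):
--             if expand_i < len(cols_to_expand) and col == cols_to_expand[expand_i]:
--                 out[-1].append(".")
--                 expand_i += 1
--
--             out[-1].append(lines[row][col])
--
--     return out
-- ===== SOURCE B (Python) =====
-- def get_expanded_image(lines: list[str]) -> list[list[str]]:
--     m, n = len(lines), len(lines[0])
--     empty_row = ["#" not in line for line in lines]
--     empty_col = [all(line[j] != "#" for line in lines) for j in range(n)]
--     row_src = [i for r in range(m) for i in ([None, r] if empty_row[r] else [r])]
--     col_src = [j for c in range(n) for j in ([None, c] if empty_col[c] else [c])]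
--     return [
--         ["." if r is None or c is None else lines[r][c] for c in col_src]
--         for r in row_src
--     ]
-- ===== Notes on version B (the rewrite author's own statement) =====
-- stated objective: alternative
-- what changed: A streams over the grid and inserts '.' rows/columns in place while walking a pointer into cols_to_expand and popping a reversed row list; B instead precomputes two index maps (output row -> source row or None, output column -> source column or None) and fills the whole output as a pure table lookup lines[r][c] over the product of the two maps, with no insertion pass at all.
import Mathlib
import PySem

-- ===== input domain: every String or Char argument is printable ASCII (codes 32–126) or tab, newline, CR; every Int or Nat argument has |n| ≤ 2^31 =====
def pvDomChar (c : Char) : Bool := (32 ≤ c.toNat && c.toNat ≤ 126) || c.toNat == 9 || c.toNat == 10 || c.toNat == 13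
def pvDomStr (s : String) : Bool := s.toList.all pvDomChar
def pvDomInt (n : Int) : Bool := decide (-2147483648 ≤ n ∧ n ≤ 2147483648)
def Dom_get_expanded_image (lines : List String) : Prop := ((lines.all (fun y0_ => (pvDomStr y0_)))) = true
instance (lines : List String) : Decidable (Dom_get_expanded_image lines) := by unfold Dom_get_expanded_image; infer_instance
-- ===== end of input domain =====

-- B replaces A's streaming insertion pass (pointer into cols_to_expand, pop-driven reversed
-- row list) by two precomputed index maps (output row/col -> source index or None) and fills
-- the output as a pure table lookup over their product (objective: alternative decomposition).

-- ===== PORT A =====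
-- 'range(m)' is ported as 'List.range m' (Nat indices), 'range(m-1,-1,-1)' as '(List.range m).reverse';
-- in-range string indexing 'lines[j][i]' is ported as '(lines.getD j "").toList.getD i '.'' — exact
-- under Pre_ (every index used is in range there).
def get_expanded_image (lines : List String) : List (List String) :=
  let m := lines.length
  let n := (lines.headD "").toList.length   -- len(lines[0]); IndexError on [] is excluded by Pre_
  let rter := (List.range m).reverse.filter
    (fun i => PySem.Str.find (lines.getD i "") "#" == -1)
  let cols := (List.range n).filter
    (fun i => (List.range m).all (fun j => (lines.getD j "").toList.getD i '.' ≠ '#'))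
  ((List.range m).foldl
    (fun (st : List (List String) × List Nat) row =>
      let st :=
        if st.2.getLast? = some row then
          (st.1 ++ [List.replicate (n + cols.length) "."], st.2.dropLast)
        else st
      let inner := (List.range n).foldl
        (fun (ir : Nat × List String) col =>
          let ir :=
            if ir.1 < cols.length ∧ cols.getD ir.1 0 = col then (ir.1 + 1, ir.2 ++ ["."])
            else ir
          (ir.1, ir.2 ++ [String.mk [(lines.getD row "").toList.getD col '.']]))
        (0, [])
      (st.1 ++ [inner.2], st.2))
    ([], rter)).1

-- ===== PORT B =====
-- 'None' in row_src/col_src is ported as Option.none; in-range 'lines[r][c]' as getD (exact under Pre_).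
def get_expanded_image_alt (lines : List String) : List (List String) :=
  let m := lines.length
  let n := (lines.headD "").toList.length   -- len(lines[0]); IndexError on [] is excluded by Pre_
  let emptyRow := lines.map (fun line => !(PySem.Str.isIn "#" line))
  let emptyCol := (List.range n).map
    (fun j => lines.all (fun line => line.toList.getD j '.' ≠ '#'))
  let rowSrc : List (Option Nat) := (List.range m).flatMap
    (fun r => if emptyRow.getD r false then [none, some r] else [some r])
  let colSrc : List (Option Nat) := (List.range n).flatMap
    (fun c => if emptyCol.getD c false then [none, some c] else [some c])
  rowSrc.map (fun r => colSrc.map (fun c =>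
    match r, c with
    | some r, some c => String.mk [(lines.getD r "").toList.getD c '.']
    | _, _ => "."))

-- ===== PRECONDITION & SPEC =====
-- Pre_ is exactly the inputs where the Python A returns: lines nonempty (else len(lines[0])
-- raises IndexError) and every line at least as long as the first (else lines[j][i] raises).
def Pre_get_expanded_image (lines : List String) : Prop :=
  lines ≠ [] ∧ ∀ s ∈ lines, (lines.headD "").toList.length ≤ s.toList.length
instance (lines : List String) : Decidable (Pre_get_expanded_image lines) := by
  unfold Pre_get_expanded_image; infer_instance

def pvWitness_get_expanded_image : List String := ["#..", ".a.", "..."]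

def Spec_get_expanded_image (lines : List String) (out : List (List String)) : Prop := out = get_expanded_image_alt lines
instance (lines : List String) (out : List (List String)) : Decidable (Spec_get_expanded_image lines out) := by unfold Spec_get_expanded_image; infer_instance

-- ===== CLAIM (what is proved, stated in full; the proofs are below) =====
def Claim_equal_get_expanded_image : Prop := ∀ (lines : List String), Dom_get_expanded_image lines → Pre_get_expanded_image lines → Spec_get_expanded_image lines (get_expanded_image lines)

-- ===== LEMMAS AND PROOFS =====

-- column-empty predicate, the common normal form of both programs
def pvQ (lines : List String) (i : Nat) : Bool :=
  lines.all (fun line => decide (line.toList.getD i '.' ≠ '#'))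

def pvCols (lines : List String) (n : Nat) : List Nat :=
  (List.range n).filter (pvQ lines)

-- one expanded row, shared normal form
def pvRow (lines : List String) (n : Nat) (line : String) : List String :=
  (List.range n).flatMap (fun i =>
    if pvQ lines i then [".", String.mk [line.toList.getD i '.']]
    else [String.mk [line.toList.getD i '.']])

-- the common normal form of the whole output
def pvT (lines : List String) : List (List String) :=
  let n := (lines.headD "").toList.length
  lines.flatMap (fun line =>
    if PySem.Str.isIn "#" line then [pvRow lines n line]
    else [List.replicate (n + (pvCols lines n).length) ".", pvRow lines n line])

-- A's range-indexed column test equals the direct all over lines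
theorem pvColsBridge (lines : List String) (i : Nat) :
    ((List.range lines.length).all (fun j => decide ((lines.getD j "").toList.getD i '.' ≠ '#')))
      = pvQ lines i := by
  unfold pvQ
  induction lines with
  | nil => simp
  | cons x xs ih =>
    rw [List.length_cons, List.range_succ_eq_map]
    simp only [List.all_cons, List.all_map, Function.comp_def, List.getD_cons_zero,
      List.getD_cons_succ]
    rw [ih]

-- row-emptiness: A's find == -1 is the negated 'in'
theorem pvRowBridge (line : String) :
    (PySem.Str.find line "#" == -1) = !(PySem.Str.isIn "#" line) := by
  simp only [PySem.Str.find_eq, PySem.Str.isIn_eq]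
  by_cases h : (['#'] : List Char) <:+: line.toList
  · have h1 : PySem.Chars.find line.toList ['#'] ≠ -1 :=
      (PySem.Chars.find_ne_neg_one_iff line.toList ['#']).mpr h
    have h2 : PySem.Chars.isIn ['#'] line.toList = true :=
      (PySem.Chars.isIn_iff_infix ['#'] line.toList).mpr h
    simp [h1, h2]
  · have h1 : PySem.Chars.find line.toList ['#'] = -1 :=
      (PySem.Chars.find_eq_neg_one_iff line.toList ['#']).mpr h
    have h2 : PySem.Chars.isIn ['#'] line.toList = false :=
      (PySem.Chars.isIn_eq_false_iff ['#'] line.toList).mpr h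
    simp [h1, h2]

theorem pvFilterRange'Cons (q : Nat → Bool) (k c : Nat) :
    (List.range' k (c+1)).filter q =
      if q k then k :: (List.range' (k+1) c).filter q else (List.range' (k+1) c).filter q := by
  rw [List.range'_succ, List.filter_cons]

theorem pvGtOfMemFilter (q : Nat → Bool) (k c x : Nat)
    (h : x ∈ (List.range' (k+1) c).filter q) : k < x := by
  have := (List.mem_range'_1.mp (List.mem_filter.mp h).1).1
  omega

theorem pvRangeSplit (k n : Nat) (h : k ≤ n) :
    List.range n = List.range k ++ List.range' k (n - k) := by
  rw [List.range_eq_range', List.range_eq_range']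
  have h2 := List.range'_append (s := 0) (m := k) (n := n - k) (step := 1)
  simp only [Nat.one_mul, Nat.zero_add] at h2
  rw [h2, Nat.add_sub_cancel' h]

-- pointer-into-sorted-list versus membership (A's expand_i mechanism)
theorem pvPointer (q : Nat → Bool) (n k : Nat) (hk : k < n) :
    ((((List.range k).filter q).length < ((List.range n).filter q).length ∧
      ((List.range n).filter q).getD (((List.range k).filter q).length) 0 = k) ↔ q k = true) := by
  have hc : n - k = (n - k - 1) + 1 := by omega
  rw [pvRangeSplit k n (Nat.le_of_lt hk), List.filter_append, List.length_append,
      List.getD_append_right _ _ _ _ (Nat.le_refl _), Nat.sub_self, hc, pvFilterRange'Cons]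
  by_cases hq : q k = true
  · rw [if_pos hq]
    simp only [hq, List.getD_cons_zero, List.length_cons, iff_true]
    exact ⟨by omega, trivial⟩
  · rw [if_neg hq]
    constructor
    · rintro ⟨h1, h2⟩
      exfalso
      cases hr : (List.range' (k+1) (n-k-1)).filter q with
      | nil => rw [hr] at h1; simp at h1
      | cons x t =>
        rw [hr] at h2
        simp only [List.getD_cons_zero] at h2
        have : k < x := pvGtOfMemFilter q k (n-k-1) x (by rw [hr]; exact List.mem_cons_self ..)
        omega
    · intro hqq; exact absurd hqq hq

-- A's inner column loop with the expand_i pointer equals a flat comprehension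
theorem pvInner (q : Nat → Bool) (cell : Nat → String) (n : Nat) :
    ∀ k, k ≤ n →
    (List.range k).foldl
      (fun (ir : Nat × List String) col =>
        let ir' := if ir.1 < ((List.range n).filter q).length ∧
                      ((List.range n).filter q).getD ir.1 0 = col
                   then (ir.1 + 1, ir.2 ++ ["."]) else ir
        (ir'.1, ir'.2 ++ [cell col])) (0, [])
    = (((List.range k).filter q).length,
       (List.range k).flatMap (fun i => if q i then [".", cell i] else [cell i])) := by
  intro k
  induction k with
  | zero => intro _; simp
  | succ k ih =>
    intro h
    rw [List.range_succ, List.foldl_append, ih (by omega), List.foldl_cons, List.foldl_nil,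
        List.flatMap_append, List.filter_append]
    have hp := pvPointer q n k (by omega)
    by_cases hq : q k = true
    · rw [if_pos (hp.mpr hq)]
      simp [hq]
    · have : ¬ (((List.range k).filter q).length < ((List.range n).filter q).length ∧
          ((List.range n).filter q).getD (((List.range k).filter q).length) 0 = k) := by
        intro hcontra; exact hq (hp.mp hcontra)
      rw [if_neg this]
      simp [hq]

-- A's outer row loop with the reversed-pop list equals a flat comprehension over rows
theorem pvOuter (E : Nat → Bool) (arow : Nat → List String) (drow : List String) (m : Nat) :
    ∀ k, k ≤ m →
    (List.range k).foldl
      (fun (st : List (List String) × List Nat) row =>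
        let st' := if st.2.getLast? = some row then (st.1 ++ [drow], st.2.dropLast) else st
        (st'.1 ++ [arow row], st'.2))
      ([], ((List.range m).filter E).reverse)
    = ((List.range k).flatMap (fun r => if E r then [drow, arow r] else [arow r]),
       ((List.range' k (m - k)).filter E).reverse) := by
  intro k
  induction k with
  | zero =>
    intro _
    simp [List.range_eq_range']
  | succ k ih =>
    intro h
    rw [List.range_succ, List.foldl_append, ih (by omega), List.foldl_cons, List.foldl_nil,
        List.flatMap_append]
    have hc : m - k = (m - k - 1) + 1 := by omega
    rw [hc, pvFilterRange'Cons]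
    by_cases hq : E k = true
    · rw [if_pos hq]
      have hlast : (k :: (List.range' (k+1) (m-k-1)).filter E).reverse.getLast? = some k := by
        rw [List.getLast?_reverse]; rfl
      rw [if_pos hlast]
      have hdrop : (k :: (List.range' (k+1) (m-k-1)).filter E).reverse.dropLast
          = ((List.range' (k+1) (m-k-1)).filter E).reverse := by
        rw [List.reverse_cons, List.dropLast_concat]
      have hmk : m - (k+1) = m - k - 1 := by omega
      rw [hdrop]
      simp [hq, hmk]
    · rw [if_neg hq]
      have hlast : ¬ (((List.range' (k+1) (m-k-1)).filter E).reverse.getLast? = some k) := by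
        rw [List.getLast?_reverse]
        intro hcontra
        have hm := List.mem_of_mem_head? hcontra
        exact absurd (pvGtOfMemFilter E k (m-k-1) k hm) (by omega)
      rw [if_neg hlast]
      have hmk : m - (k+1) = m - k - 1 := by omega
      simp [hq, hmk]

-- indexed flatMap over range(len) equals direct flatMap (rows pass)
theorem pvRowsBridge (lines : List String) (F : String → List (List String)) :
    (List.range lines.length).flatMap (fun r => F (lines.getD r "")) = lines.flatMap F := by
  induction lines with
  | nil => simp
  | cons x xs ih =>
    rw [List.length_cons, List.range_succ_eq_map]
    simp only [List.flatMap_cons, List.flatMap_map, List.getD_cons_zero,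
      List.getD_cons_succ]
    rw [ih]

-- length of an Option index map
theorem pvOptLen (q : Nat → Bool) (l : List Nat) :
    (l.flatMap (fun i => if q i then ([none, some i] : List (Option Nat)) else [some i])).length
      = l.length + (l.filter q).length := by
  induction l with
  | nil => rfl
  | cons x t ih =>
    simp only [List.flatMap_cons, List.filter_cons, List.length_append, List.length_cons, ih]
    split <;> simp <;> omega

-- getD through map of range: reads f i for i < n
theorem pvGetDMapRange {α : Type} (f : Nat → α) (n i : Nat) (d : α) (h : i < n) :
    ((List.range n).map f).getD i d = f i := by
  rw [List.getD_eq_getElem?_getD, List.getElem?_map, List.getElem?_range h]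
  rfl

-- getD through map of a list: reads f (xs.getD i d') for i < length
theorem pvGetDMap {α β : Type} (f : α → β) (xs : List α) (i : Nat) (d : β) (d' : α)
    (h : i < xs.length) : (xs.map f).getD i d = f (xs.getD i d') := by
  rw [List.getD_eq_getElem?_getD, List.getElem?_map, List.getElem?_eq_getElem h,
      List.getD_eq_getElem?_getD, List.getElem?_eq_getElem h]
  rfl

theorem pvFlipIf {α : Type} (b : Bool) (X Y : α) :
    (if (!b) = true then X else Y) = (if b = true then Y else X) := by
  cases b <;> simp

theorem pvAeqT (lines : List String) : get_expanded_image lines = pvT lines := by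
  unfold get_expanded_image
  simp only [pvColsBridge]
  set m := lines.length with hm
  set n := (lines.headD "").toList.length with hn
  set E : Nat → Bool := fun i => (PySem.Str.find (lines.getD i "") "#" == -1) with hE
  rw [List.filter_reverse]
  set drow := List.replicate (n + ((List.range n).filter (fun i => pvQ lines i)).length) ("." : String) with hdrow
  set arow : Nat → List String := fun row =>
    ((List.range n).foldl
      (fun (ir : Nat × List String) col =>
        let ir' := if ir.1 < ((List.range n).filter (fun i => pvQ lines i)).length ∧
                      ((List.range n).filter (fun i => pvQ lines i)).getD ir.1 0 = col
                   then (ir.1 + 1, ir.2 ++ ["."]) else ir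
        (ir'.1, ir'.2 ++ [String.mk [(lines.getD row "").toList.getD col '.']])) (0, [])).2
    with harow
  rw [pvOuter E arow drow m m (Nat.le_refl m)]
  have hA : ∀ r : Nat, arow r = pvRow lines n (lines.getD r "") := by
    intro r
    rw [harow]
    have := congrArg Prod.snd
      (pvInner (pvQ lines) (fun col => String.mk [(lines.getD r "").toList.getD col '.']) n n (Nat.le_refl n))
    simpa [pvRow] using this
  have hE' : ∀ r : Nat, E r = !(PySem.Str.isIn "#" (lines.getD r "")) := by
    intro r; rw [hE]; exact pvRowBridge (lines.getD r "")
  simp only [hA, hE', pvFlipIf]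
  rw [pvRowsBridge lines (fun line =>
    if PySem.Str.isIn "#" line = true then [pvRow lines n line] else [drow, pvRow lines n line])]
  unfold pvT
  simp only []
  apply List.flatMap_congr
  intro line hline
  rw [hdrow]
  rfl

theorem pvBeqT (lines : List String) : get_expanded_image_alt lines = pvT lines := by
  unfold get_expanded_image_alt
  simp only []
  set m := lines.length with hm
  set n := (lines.headD "").toList.length with hn
  -- the column index map, getD'd table normalised to the direct predicate
  set Cs : List (Option Nat) := (List.range n).flatMap
    (fun c => if pvQ lines c then [none, some c] else [some c]) with hCsdef
  have hCs : (List.range n).flatMap (fun c =>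
      if ((List.range n).map (fun j => lines.all (fun line => decide (line.toList.getD j '.' ≠ '#')))).getD c false
      then ([none, some c] : List (Option Nat)) else [some c]) = Cs := by
    apply List.flatMap_congr
    intro c hc
    rw [pvGetDMapRange _ n c false (List.mem_range.mp hc)]
    rfl
  rw [hCs, List.map_flatMap]
  have hlen : Cs.length = n + (pvCols lines n).length := by
    rw [hCsdef, pvOptLen]
    simp [pvCols]
  have hFnone : Cs.map (fun c => (match (none : Option Nat), c with
      | some r, some c => String.mk [(lines.getD r "").toList.getD c '.']
      | _, _ => ".")) = List.replicate (n + (pvCols lines n).length) "." := by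
    have hc : ∀ c : Option Nat, (match (none : Option Nat), c with
        | some r, some c => String.mk [(lines.getD r "").toList.getD c '.']
        | _, _ => ".") = ("." : String) := by
      intro c; cases c <;> rfl
    rw [List.map_congr_left (fun c _ => hc c), List.map_const', hlen]
  have hFsome : ∀ r : Nat, Cs.map (fun c => (match (some r : Option Nat), c with
      | some r, some c => String.mk [(lines.getD r "").toList.getD c '.']
      | _, _ => ".")) = pvRow lines n (lines.getD r "") := by
    intro r
    rw [hCsdef, List.map_flatMap]
    unfold pvRow
    apply List.flatMap_congr
    intro c _
    by_cases hq : pvQ lines c = true <;> simp [hq]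
  have hper : ∀ r ∈ List.range m,
      ((if (lines.map (fun line => !(PySem.Str.isIn "#" line))).getD r false
          then ([none, some r] : List (Option Nat)) else [some r]).map
        (fun x => Cs.map (fun c => (match x, c with
          | some r, some c => String.mk [(lines.getD r "").toList.getD c '.']
          | _, _ => "."))))
      = (if PySem.Str.isIn "#" (lines.getD r "") = true
          then [pvRow lines n (lines.getD r "")]
          else [List.replicate (n + (pvCols lines n).length) ".", pvRow lines n (lines.getD r "")]) := by
    intro r hr
    rw [pvGetDMap _ lines r false "" (by rw [← hm]; exact List.mem_range.mp hr), pvFlipIf]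
    by_cases hb : PySem.Str.isIn "#" (lines.getD r "") = true
    · rw [if_pos hb, if_pos hb, List.map_cons, List.map_nil, hFsome r]
    · rw [if_neg hb, if_neg hb, List.map_cons, List.map_cons, List.map_nil, hFnone, hFsome r]
  rw [List.flatMap_congr hper,
      pvRowsBridge lines (fun line =>
        if PySem.Str.isIn "#" line = true then [pvRow lines n line]
        else [List.replicate (n + (pvCols lines n).length) ".", pvRow lines n line])]
  unfold pvT
  rfl

theorem pvMain (lines : List String) : get_expanded_image lines = get_expanded_image_alt lines :=
  (pvAeqT lines).trans (pvBeqT lines).symm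

-- ===== VERDICT (by name: the statement is the Claim_ definition above) =====
theorem get_expanded_image_spec : Claim_equal_get_expanded_image := by
  intro lines _ _
  show get_expanded_image lines = get_expanded_image_alt lines
  exact pvMain lines
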